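-- pv_equiv track=rewrite | github.com/nobe0716/problem_solving | codeforces/contests/1372/C. Omkar and Baseball.py | solve
-- ===== SOURCE A (Python) =====
-- from typing import List
--
-- def solve(n: int, a: List[int]) -> int:
--     lo = 0
--     while lo < n and a[lo] == lo + 1:
--         lo += 1
--     hi = n - 1
--     while hi >= 0 and a[hi] == hi + 1:
--         hi -= 1
--
--     if lo == n:
--         return 0
--
--     for i in range(lo, hi):
--         if a[i] == i + 1:
--             return 2
--
--     return 1
-- ===== SOURCE B (Python) =====
-- from typing import List
--
-- def solve(n: int, a: List[int]) -> int:
--     blocks = 0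
--     prev_bad = False
--     for i in range(n):
--         bad = a[i] != i + 1
--         if bad and not prev_bad:
--             blocks += 1
--         prev_bad = bad
--     return min(blocks, 2)
-- ===== Notes on version B (the rewrite author's own statement) =====
-- stated objective: alternative
-- what changed: replaces A's two end-boundary while-scans plus an interior fixed-point scan with a single left-to-right pass that counts maximal contiguous runs of misplaced elements and returns min(runs, 2): 0 runs = sorted, 1 run = one reshuffle, >1 run = 2 (a fixed point lies between two runs)
-- outside the precondition, e.g. on solve(-1, []): A returns 1, B returns 0
import Mathlib
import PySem

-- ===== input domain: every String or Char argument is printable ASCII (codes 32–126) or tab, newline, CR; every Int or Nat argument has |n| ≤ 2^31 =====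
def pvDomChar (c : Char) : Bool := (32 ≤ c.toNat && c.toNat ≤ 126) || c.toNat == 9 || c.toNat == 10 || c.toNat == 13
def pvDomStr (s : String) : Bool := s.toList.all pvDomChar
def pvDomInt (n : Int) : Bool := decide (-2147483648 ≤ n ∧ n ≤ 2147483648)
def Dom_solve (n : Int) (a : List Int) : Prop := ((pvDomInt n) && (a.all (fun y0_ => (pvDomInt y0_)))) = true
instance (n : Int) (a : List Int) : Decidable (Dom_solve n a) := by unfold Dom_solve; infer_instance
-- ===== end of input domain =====

-- B replaces A's two end-boundary while-scans plus interior fixed-point scan with one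
-- left-to-right pass counting maximal runs of misplaced elements, returning min(runs, 2).


-- ===== PORT A =====
-- 'while lo < n and a[lo] == lo + 1: lo += 1'
def pvLoLoop (a : List Int) (n lo : Int) : Nat → Int
  | 0 => lo
  | fuel + 1 =>
    if lo < n then
      match PySem.List.pyGet? a lo with
      | some v => if v = lo + 1 then pvLoLoop a n (lo + 1) fuel else lo
      | none => lo
    else lo

-- 'while hi >= 0 and a[hi] == hi + 1: hi -= 1'
def pvHiLoop (a : List Int) (hi : Int) : Nat → Int
  | 0 => hi
  | fuel + 1 =>
    if 0 ≤ hi then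
      match PySem.List.pyGet? a hi with
      | some v => if v = hi + 1 then pvHiLoop a (hi - 1) fuel else hi
      | none => hi
    else hi

-- 'for i in range(lo, hi): if a[i] == i + 1: return 2' then 'return 1'
def pvMidLoop (a : List Int) (i hi : Int) : Nat → Int
  | 0 => 1
  | fuel + 1 =>
    if i < hi then
      match PySem.List.pyGet? a i with
      | some v => if v = i + 1 then 2 else pvMidLoop a (i + 1) hi fuel
      | none => pvMidLoop a (i + 1) hi fuel
    else 1

def solve (n : Int) (a : List Int) : Int :=
  let lo := pvLoLoop a n 0 n.toNat
  let hi := pvHiLoop a (n - 1) n.toNat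
  if lo = n then 0
  else pvMidLoop a lo hi (hi - lo).toNat

-- ===== PORT B =====
-- single pass: count maximal runs of misplaced elements, answer min(runs, 2)
def solve_alt (n : Int) (a : List Int) : Int :=
  let st := (PySem.List.pyRange 0 n 1).foldl
    (fun (st : Int × Bool) i =>
      let bad := !(PySem.List.pyGet? a i == some (i + 1))
      (if bad && !st.2 then st.1 + 1 else st.1, bad))
    (0, false)
  min st.1 2

-- ===== PRECONDITION & SPEC =====
-- Pre_ excludes n > len(a), where A (and B) raise IndexError, and the malformed negative
-- count n < 0, on which A's fall-through 'return 1' is leftover-loop-state behaviour.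
def Pre_solve (n : Int) (a : List Int) : Prop := 0 ≤ n ∧ n ≤ (a.length : Int)
instance (n : Int) (a : List Int) : Decidable (Pre_solve n a) := by unfold Pre_solve; infer_instance
def pvWitness_solve : Int × List Int := (4, [1, 3, 2, 4])

def Spec_solve (n : Int) (a : List Int) (out : Int) : Prop := out = solve_alt n a
instance (n : Int) (a : List Int) (out : Int) : Decidable (Spec_solve n a out) := by unfold Spec_solve; infer_instance

-- ===== CLAIM (what is proved, stated in full; the proofs are below) =====
def Claim_equal_solve : Prop := ∀ (n : Int) (a : List Int), Dom_solve n a → Pre_solve n a → Spec_solve n a (solve n a)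

-- ===== LEMMAS AND PROOFS =====

-- the mismatch test both ports apply at index i
def pvMism (a : List Int) (i : Int) : Bool := !(PySem.List.pyGet? a i == some (i + 1))

-- 'there is a fixed point a[j] == j+1 somewhere in range(lo, hi)'
def pvGoodAny (a : List Int) (lo hi : Int) : Bool :=
  (PySem.List.pyRange lo hi 1).any (fun j => PySem.List.pyGet? a j == some (j + 1))

-- one iteration of B's loop body
def pvStep (a : List Int) (st : Int × Bool) (i : Int) : Int × Bool :=
  (if pvMism a i && !st.2 then st.1 + 1 else st.1, pvMism a i)

-- B's loop state after scanning range(m)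
def pvS (a : List Int) (m : Int) : Int × Bool :=
  (PySem.List.pyRange 0 m 1).foldl (pvStep a) (0, false)

-- the list of mismatched indices in range(m)
def pvM (a : List Int) (m : Int) : List Int :=
  (PySem.List.pyRange 0 m 1).filter (pvMism a)

theorem pvLoLoop_spec (a : List Int) (n : Int) :
    ∀ (fuel : Nat) (lo : Int), lo ≤ n → (n - lo).toNat ≤ fuel →
      pvLoLoop a n lo fuel = ((PySem.List.pyRange lo n 1).filter (pvMism a)).headD n := by
  intro fuel
  induction fuel with
  | zero =>
    intro lo hle hf
    have hlo : lo = n := by omega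
    subst hlo
    simp [pvLoLoop, PySem.List.pyRange_one_eq_nil le_rfl]
  | succ fuel ih =>
    intro lo hle hf
    by_cases hlt : lo < n
    · rw [PySem.List.pyRange_one_cons hlt]
      cases hg : PySem.List.pyGet? a lo with
      | none => simp [pvLoLoop, hlt, hg, pvMism]
      | some v =>
        by_cases hv : v = lo + 1
        · subst hv
          have := ih (lo + 1) (by omega) (by omega)
          simp [pvLoLoop, hlt, hg, pvMism, this]
        · simp [pvLoLoop, hlt, hg, pvMism, hv]
    · have hlo : lo = n := by omega
      subst hlo
      simp [pvLoLoop, PySem.List.pyRange_one_eq_nil le_rfl]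

theorem pvHiLoop_spec (a : List Int) :
    ∀ (fuel : Nat) (hi : Int), -1 ≤ hi → (hi + 1).toNat ≤ fuel →
      pvHiLoop a hi fuel = ((PySem.List.pyRange 0 (hi + 1) 1).filter (pvMism a)).getLastD (-1) := by
  intro fuel
  induction fuel with
  | zero =>
    intro hi hle hf
    have hhi : hi = -1 := by omega
    subst hhi
    simp [pvHiLoop]
  | succ fuel ih =>
    intro hi hle hf
    by_cases hge : 0 ≤ hi
    · rw [PySem.List.pyRange_one_succ_right hge, List.filter_append]
      cases hg : PySem.List.pyGet? a hi with
      | none => simp [pvHiLoop, hge, hg, pvMism]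
      | some v =>
        by_cases hv : v = hi + 1
        · subst hv
          have := ih (hi - 1) (by omega) (by omega)
          have he : hi - 1 + 1 = hi := by omega
          rw [he] at this
          simp [pvHiLoop, hge, hg, pvMism, this]
        · simp [pvHiLoop, hge, hg, pvMism, hv]
    · have hhi : hi = -1 := by omega
      subst hhi
      simp [pvHiLoop]

theorem pvMidLoop_spec (a : List Int) :
    ∀ (fuel : Nat) (i hi : Int), (hi - i).toNat ≤ fuel →
      pvMidLoop a i hi fuel = (if pvGoodAny a i hi then 2 else 1) := by
  intro fuel
  induction fuel with
  | zero =>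
    intro i hi hf
    have : hi ≤ i := by omega
    simp [pvMidLoop, pvGoodAny, PySem.List.pyRange_one_eq_nil this]
  | succ fuel ih =>
    intro i hi hf
    by_cases hlt : i < hi
    · unfold pvGoodAny
      rw [PySem.List.pyRange_one_cons hlt]
      cases hg : PySem.List.pyGet? a i with
      | none =>
        rw [List.any_cons, hg]
        show pvMidLoop a i hi (fuel + 1) = _
        rw [pvMidLoop, if_pos hlt, hg, ih (i + 1) hi (by omega)]
        rfl
      | some v =>
        by_cases hv : v = i + 1
        · subst hv
          simp [pvMidLoop, hlt, hg]
        · have hmid := ih (i + 1) hi (by omega)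
          unfold pvGoodAny at hmid
          simp only [pvMidLoop, List.any_cons, hg, if_pos hlt, hmid, if_neg hv]
          rw [show (some v == some (i + 1) : Bool) = false from by simp [hv], Bool.false_or]
    · simp [pvMidLoop, hlt, pvGoodAny, PySem.List.pyRange_one_eq_nil (by omega : hi ≤ i)]

-- A equals: 0 if no mismatch; else 2 iff a fixed point lies strictly between the first
-- and last mismatched index, else 1
theorem solve_char (n : Int) (a : List Int) (hn0 : 0 ≤ n) :
    solve n a = (match pvM a n with
      | [] => (0 : Int)
      | lo :: rest =>
          if pvGoodAny a lo ((lo :: rest).getLast (List.cons_ne_nil _ _)) then 2 else 1) := by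
  unfold solve
  have hlo := pvLoLoop_spec a n n.toNat 0 hn0 (by omega)
  have hhi := pvHiLoop_spec a n.toNat (n - 1) (by omega) (by omega)
  rw [show n - 1 + 1 = n by ring] at hhi
  have hMdef : (PySem.List.pyRange 0 n 1).filter (pvMism a) = pvM a n := rfl
  rw [hMdef] at hlo hhi
  rw [hlo, hhi]
  cases hcase : pvM a n with
  | nil => simp
  | cons l0 rest =>
    have hmem : l0 ∈ pvM a n := by rw [hcase]; exact List.mem_cons_self
    have hl0 : l0 < n := by
      have := (PySem.List.mem_pyRange_one).1 (List.mem_of_mem_filter hmem)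
      omega
    have hlast : List.getLastD (l0 :: rest) (-1) = List.getLast (l0 :: rest) (List.cons_ne_nil _ _) := by
      rw [List.getLast_eq_getLastD, List.getLastD_cons]
    simp only [List.headD_cons, hlast]
    rw [if_neg (by omega : ¬ l0 = n)]
    exact pvMidLoop_spec a _ l0 _ le_rfl

theorem pvS_zero (a : List Int) : pvS a 0 = (0, false) := by
  simp [pvS, PySem.List.pyRange_one_eq_nil le_rfl]

theorem pvS_succ (a : List Int) (m : Int) (h : 0 ≤ m) :
    pvS a (m + 1) = pvStep a (pvS a m) m := by
  unfold pvS
  rw [PySem.List.pyRange_one_succ_right h, List.foldl_append, List.foldl_cons, List.foldl_nil]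

theorem pvM_zero (a : List Int) : pvM a 0 = [] := by
  simp [pvM, PySem.List.pyRange_one_eq_nil le_rfl]

theorem pvM_succ (a : List Int) (m : Int) (h : 0 ≤ m) :
    pvM a (m + 1) = pvM a m ++ (if pvMism a m then [m] else []) := by
  unfold pvM
  rw [PySem.List.pyRange_one_succ_right h, List.filter_append]
  congr 1
  by_cases hb : pvMism a m <;> simp [List.filter, hb]

theorem pvM_mem (a : List Int) (m x : Int) (h : x ∈ pvM a m) :
    pvMism a x = true ∧ 0 ≤ x ∧ x < m := by
  rw [pvM, List.mem_filter] at h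
  have := (PySem.List.mem_pyRange_one).1 h.1
  exact ⟨h.2, this.1, this.2⟩

theorem pvM_pairwise (a : List Int) (m : Int) : (pvM a m).Pairwise (· < ·) :=
  (PySem.List.pairwise_lt_pyRange_one 0 m).filter _

theorem pv_le_getLast : ∀ (l : List Int) (h : l ≠ []) (x : Int),
    l.Pairwise (· < ·) → x ∈ l → x ≤ l.getLast h := by
  intro l
  induction l with
  | nil => intro h; exact absurd rfl h
  | cons b t ih =>
    intro h x hp hx
    cases t with
    | nil =>
      simp at hx
      simp [hx, List.getLast]
    | cons c u =>
      have htne : c :: u ≠ [] := List.cons_ne_nil _ _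
      rw [List.getLast_cons htne]
      rcases List.mem_cons.1 hx with hxb | hxt
      · subst hxb
        exact le_of_lt (List.rel_of_pairwise_cons hp (List.getLast_mem htne))
      · exact ih htne x hp.of_cons hxt

theorem pvGoodAny_false_of_mism (a : List Int) (k : Int) (hb : pvMism a k = true) :
    pvGoodAny a k (k + 1) = false := by
  unfold pvGoodAny
  rw [PySem.List.pyRange_one_singleton]
  unfold pvMism at hb
  simp at hb ⊢
  exact hb

theorem pvGetLast_eq (l : List Int) (h : l ≠ []) (x : Int)
    (hx : l.getLast? = some x) : l.getLast h = x := by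
  rw [List.getLast?_eq_getLast_of_ne_nil h] at hx
  exact (Option.some.injEq _ _ ▸ hx)

-- the loop invariant tying B's (count, prev) state to the mismatch list of the prefix
theorem pvInv (a : List Int) : ∀ m : Nat,
    0 ≤ (pvS a (m : Int)).1 ∧
    (pvM a (m : Int) = [] ↔ (pvS a (m : Int)).1 = 0) ∧
    (∀ lo rest, pvM a (m : Int) = lo :: rest →
      (lo :: rest).getLast (List.cons_ne_nil _ _) < (m : Int) ∧
      (pvGoodAny a lo ((lo :: rest).getLast (List.cons_ne_nil _ _)) = true ↔
        2 ≤ (pvS a (m : Int)).1)) := by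
  intro m
  induction m with
  | zero =>
    refine ⟨by simp [pvS_zero], by simp [pvS_zero, pvM_zero], ?_⟩
    intro lo rest h
    simp [pvM_zero] at h
  | succ k ih =>
    obtain ⟨hge, hiff, hcons⟩ := ih
    have hk0 : (0 : Int) ≤ (k : Int) := Int.natCast_nonneg k
    have hcast : ((k + 1 : Nat) : Int) = (k : Int) + 1 := by push_cast; ring
    rw [hcast, pvS_succ a _ hk0]
    -- if prev is set, index k-1 is misplaced and belongs to the mismatch list
    have hprev_char : (pvS a (k : Int)).2 = true →
        pvMism a ((k : Int) - 1) = true ∧ ((k : Int) - 1) ∈ pvM a (k : Int) ∧ 1 ≤ (k : Int) := by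
      intro hp
      cases k with
      | zero =>
        rw [Nat.cast_zero, pvS_zero] at hp
        exact absurd hp (by simp)
      | succ j =>
        have hj0 : (0 : Int) ≤ (j : Int) := Int.natCast_nonneg j
        have hc : ((j + 1 : Nat) : Int) = (j : Int) + 1 := by push_cast; ring
        rw [hc, pvS_succ a _ hj0] at hp
        have hmj : pvMism a (j : Int) = true := hp
        refine ⟨?_, ?_, by rw [hc]; omega⟩
        · rw [hc, show (j : Int) + 1 - 1 = (j : Int) by ring]
          exact hmj
        · rw [hc, show (j : Int) + 1 - 1 = (j : Int) by ring, pvM_succ a _ hj0, hmj]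
          simp
    -- if prev is clear and some index is already misplaced, index k-1 is a fixed point
    have hprev_false : (pvS a (k : Int)).2 = false → pvM a (k : Int) ≠ [] →
        pvMism a ((k : Int) - 1) = false ∧ 1 ≤ (k : Int) := by
      intro hp hne
      cases k with
      | zero =>
        rw [Nat.cast_zero, pvM_zero] at hne
        exact absurd rfl hne
      | succ j =>
        have hj0 : (0 : Int) ≤ (j : Int) := Int.natCast_nonneg j
        have hc : ((j + 1 : Nat) : Int) = (j : Int) + 1 := by push_cast; ring
        rw [hc, pvS_succ a _ hj0] at hp
        refine ⟨?_, by rw [hc]; omega⟩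
        rw [hc, show (j : Int) + 1 - 1 = (j : Int) by ring]
        exact hp
    by_cases hb : pvMism a (k : Int) = true
    · -- index k is misplaced: it joins (or starts) a run
      cases hM : pvM a (k : Int) with
      | nil =>
        -- first misplaced index ever: count goes 0 → 1, prev must be clear
        have hcnt0 : (pvS a (k : Int)).1 = 0 := hiff.1 hM
        have hpf : (pvS a (k : Int)).2 = false := by
          cases hp : (pvS a (k : Int)).2
          · rfl
          · obtain ⟨_, hjm, _⟩ := hprev_char hp
            rw [hM] at hjm
            simp at hjm
        have hM1 : pvM a ((k : Int) + 1) = [(k : Int)] := by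
          rw [pvM_succ a _ hk0, hM, hb]
          simp
        have hstep1 : (pvStep a (pvS a (k : Int)) (k : Int)).1 = 1 := by
          simp [pvStep, hb, hpf, hcnt0]
        rw [hM1, hstep1]
        refine ⟨by norm_num, by simp, ?_⟩
        intro lo rest h
        injection h with h1 h2
        subst h1
        subst h2
        have hgl : ((k : Int) :: ([] : List Int)).getLast (List.cons_ne_nil _ _) = (k : Int) := rfl
        rw [hgl]
        refine ⟨by omega, ?_⟩
        unfold pvGoodAny
        rw [PySem.List.pyRange_one_eq_nil le_rfl]
        constructor
        · intro hfa
          exact absurd hfa (by simp)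
        · intro h2
          exact absurd h2 (by norm_num)
      | cons lo rest =>
        obtain ⟨hhi_lt, hhi_iff⟩ := hcons lo rest hM
        have hMne : pvM a (k : Int) ≠ [] := by rw [hM]; exact List.cons_ne_nil _ _
        have hcnt_ne : (pvS a (k : Int)).1 ≠ 0 := fun h0 => hMne (hiff.2 h0)
        have hcnt1 : 1 ≤ (pvS a (k : Int)).1 := by omega
        set hi := (lo :: rest).getLast (List.cons_ne_nil _ _) with hhi_def
        have hhi_mem : hi ∈ pvM a (k : Int) := by
          rw [hM]
          exact List.getLast_mem (List.cons_ne_nil _ _)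
        have hhi_bad : pvMism a hi = true := (pvM_mem a _ hi hhi_mem).1
        have hlo_le_hi : lo ≤ hi :=
          pv_le_getLast (lo :: rest) (List.cons_ne_nil _ _) lo
            (hM ▸ pvM_pairwise a (k : Int)) List.mem_cons_self
        have hM1 : pvM a ((k : Int) + 1) = lo :: (rest ++ [(k : Int)]) := by
          rw [pvM_succ a _ hk0, hM, hb]
          simp
        have hgl : (lo :: (rest ++ [(k : Int)])).getLast (List.cons_ne_nil _ _) = (k : Int) := by
          apply pvGetLast_eq
          rw [show lo :: (rest ++ [(k : Int)]) = (lo :: rest) ++ [(k : Int)] from by simp]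
          exact List.getLast?_concat
        have hsplit : pvGoodAny a lo (k : Int) =
            (pvGoodAny a lo hi || pvGoodAny a hi (k : Int)) := by
          unfold pvGoodAny
          rw [PySem.List.pyRange_one_append lo hi (k : Int) hlo_le_hi (le_of_lt hhi_lt),
            List.any_append]
        rw [hM1]
        cases hp : (pvS a (k : Int)).2
        · -- previous index in place: a new run starts; k-1 is a fixed point past hi
          obtain ⟨hj_good, hk1⟩ := hprev_false hp hMne
          have hhij : hi < (k : Int) - 1 := by
            have hne : hi ≠ (k : Int) - 1 := by
              intro he
              rw [he, hj_good] at hhi_bad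
              simp at hhi_bad
            omega
          have hany_tail : pvGoodAny a hi (k : Int) = true := by
            unfold pvGoodAny
            rw [List.any_eq_true]
            refine ⟨(k : Int) - 1, PySem.List.mem_pyRange_one.2 ⟨by omega, by omega⟩, ?_⟩
            unfold pvMism at hj_good
            simpa using hj_good
          have hstep1 : (pvStep a (pvS a (k : Int)) (k : Int)).1 = (pvS a (k : Int)).1 + 1 := by
            simp [pvStep, hb, hp]
          rw [hstep1]
          refine ⟨by omega, ?_, ?_⟩
          · constructor
            · intro h
              exact absurd h (List.cons_ne_nil _ _)
            · intro h0
              exact absurd h0 (by omega)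
          · intro lo' rest' h
            injection h with h1 h2
            subst h1
            subst h2
            rw [hgl]
            refine ⟨by omega, ?_⟩
            rw [hsplit, hany_tail, Bool.or_true]
            constructor
            · intro _
              omega
            · intro _
              rfl
        · -- previous index also misplaced: the same run continues, hi = k-1
          obtain ⟨hj_bad, hj_mem, hk1⟩ := hprev_char hp
          have hj_le_hi : (k : Int) - 1 ≤ hi :=
            pv_le_getLast (lo :: rest) (List.cons_ne_nil _ _) ((k : Int) - 1)
              (hM ▸ pvM_pairwise a (k : Int)) (hM ▸ hj_mem)
          have hhi_eq : hi = (k : Int) - 1 := by omega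
          have hany_tail : pvGoodAny a hi (k : Int) = false := by
            have h1 := pvGoodAny_false_of_mism a ((k : Int) - 1) (hhi_eq ▸ hhi_bad)
            rw [show ((k : Int) - 1) + 1 = (k : Int) by ring] at h1
            rw [hhi_eq]
            exact h1
          have hstep1 : (pvStep a (pvS a (k : Int)) (k : Int)).1 = (pvS a (k : Int)).1 := by
            simp [pvStep, hb, hp]
          rw [hstep1]
          refine ⟨hge, ?_, ?_⟩
          · constructor
            · intro h
              exact absurd h (List.cons_ne_nil _ _)
            · intro h0
              exact absurd (hiff.2 h0) hMne
          · intro lo' rest' h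
            injection h with h1 h2
            subst h1
            subst h2
            rw [hgl]
            refine ⟨by omega, ?_⟩
            rw [hsplit, hany_tail, Bool.or_false]
            exact hhi_iff
    · -- index k is in place: nothing changes except prev := false
      have hb' : pvMism a (k : Int) = false := Bool.eq_false_iff.mpr hb
      have hM1 : pvM a ((k : Int) + 1) = pvM a (k : Int) := by
        rw [pvM_succ a _ hk0, hb']
        simp
      have hstep1 : (pvStep a (pvS a (k : Int)) (k : Int)).1 = (pvS a (k : Int)).1 := by
        simp [pvStep, hb']
      rw [hM1, hstep1]
      refine ⟨hge, hiff, ?_⟩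
      intro lo rest h
      obtain ⟨h1, h2⟩ := hcons lo rest h
      exact ⟨by omega, h2⟩

-- ===== VERDICT (by name: the statement is the Claim_ definition above) =====
theorem solve_spec : Claim_equal_solve := by
  intro n a _ hpre
  obtain ⟨hn0, _⟩ := hpre
  unfold Spec_solve
  have halt : solve_alt n a = min (pvS a n).1 2 := rfl
  have hchar := solve_char n a hn0
  have hn : ((n.toNat : Nat) : Int) = n := Int.toNat_of_nonneg hn0
  obtain ⟨hge, hiff, hcons⟩ := pvInv a n.toNat
  rw [hn] at hge hiff hcons
  rw [halt, hchar]
  cases hM : pvM a n with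
  | nil =>
    have h0 : (pvS a n).1 = 0 := hiff.1 hM
    show (0 : Int) = min (pvS a n).1 2
    omega
  | cons lo rest =>
    obtain ⟨_, hany⟩ := hcons lo rest hM
    have hcnt_ne : (pvS a n).1 ≠ 0 := by
      intro h0
      rw [hiff.2 h0] at hM
      exact absurd hM.symm (List.cons_ne_nil _ _)
    show (if pvGoodAny a lo ((lo :: rest).getLast (List.cons_ne_nil _ _)) then (2 : Int) else 1)
        = min (pvS a n).1 2
    split_ifs with h2
    · have := hany.1 h2
      omega
    · have h3 : ¬ 2 ≤ (pvS a n).1 := fun hx => h2 (hany.2 hx)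
      omega
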